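-- pv_equiv track=rewrite | github.com/cipherxsniper/omega | omega_kernel_v22.py | cluster_goals
-- ===== SOURCE A (Python) =====
-- def cluster_goals(goals):
--     clusters = {}
--
--     for g in goals:
--         key = g["name"]
--
--         # simple semantic grouping heuristic
--         if "ml" in key or "memory" in key:
--             cluster = "learning"
--         elif "swarm" in key:
--             cluster = "distributed"
--         else:
--             cluster = "general"
--
--         if cluster not in clusters:
--             clusters[cluster] = []
--
--         clusters[cluster].append(g)
--
--     return clusters
-- ===== SOURCE B (Python) =====
-- def cluster_goals(goals):
--     # Bucket-outer re-implementation: classify once per goal conceptually, collect the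
--     # distinct cluster labels in first-appearance order, then build each bucket by a
--     # filter pass.  Same return value as the single-pass dict-building original.
--     def classify(name):
--         if "ml" in name or "memory" in name:
--             return "learning"
--         if "swarm" in name:
--             return "distributed"
--         return "general"
--
--     labels = list(dict.fromkeys(classify(g["name"]) for g in goals))
--     return {label: [g for g in goals if classify(g["name"]) == label]
--             for label in labels}
-- ===== Notes on version B (the rewrite author's own statement) =====
-- stated objective: alternative
-- what changed: Replaces the single classify-and-append pass that mutates a dict with a bucket-outer traversal: dedup the classified labels in first-appearance order, then build each bucket with a filter pass over the goals.
import Mathlib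
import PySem

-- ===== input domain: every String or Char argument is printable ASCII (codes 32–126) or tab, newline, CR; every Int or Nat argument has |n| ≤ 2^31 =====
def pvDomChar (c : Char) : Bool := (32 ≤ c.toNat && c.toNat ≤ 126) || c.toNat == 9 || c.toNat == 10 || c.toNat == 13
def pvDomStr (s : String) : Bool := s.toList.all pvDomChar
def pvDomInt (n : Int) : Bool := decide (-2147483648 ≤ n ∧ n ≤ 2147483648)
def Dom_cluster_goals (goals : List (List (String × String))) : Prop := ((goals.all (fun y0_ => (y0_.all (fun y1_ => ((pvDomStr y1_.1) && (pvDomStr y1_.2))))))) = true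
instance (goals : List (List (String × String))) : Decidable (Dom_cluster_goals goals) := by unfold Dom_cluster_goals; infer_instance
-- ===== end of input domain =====

-- B differs from A only in traversal strategy (labels outer, filter inner) — equal return value on Pre_.

-- ===== PORT A =====
-- single pass: classify each goal and append it to its (possibly fresh) cluster bucket
def cluster_goals (goals : List (List (String × String))) : List (String × List (List (String × String))) :=
  (goals.foldl
    (fun clusters g =>
      let key := (PySem.Dict.mk g).getD "name" ""   -- g["name"]; KeyError when "name" absent → excluded by Pre_
      let cluster :=
        if PySem.Str.isIn "ml" key || PySem.Str.isIn "memory" key then "learning"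
        else if PySem.Str.isIn "swarm" key then "distributed"
        else "general"
      let clusters := if clusters.contains cluster then clusters else clusters.insert cluster []
      clusters.modify cluster [] (fun v => v ++ [g]))
    PySem.Dict.empty).items

-- ===== PORT B =====
def pvClassify (name : String) : String :=
  if PySem.Str.isIn "ml" name || PySem.Str.isIn "memory" name then "learning"
  else if PySem.Str.isIn "swarm" name then "distributed"
  else "general"

def pvClusterOf (g : List (String × String)) : String :=
  pvClassify ((PySem.Dict.mk g).getD "name" "")   -- g["name"]; absent "name" excluded by Pre_

-- labels in first-appearance order, then one filter pass per label
def cluster_goals_alt (goals : List (List (String × String))) : List (String × List (List (String × String))) :=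
  let labels := PySem.List.dedup (goals.map pvClusterOf)
  labels.map (fun l => (l, goals.filter (fun g => pvClusterOf g == l)))

-- ===== PRECONDITION & SPEC =====
-- Pre_ excludes exactly the inputs on which A (and B) raise KeyError: a goal without a "name" key.
def Pre_cluster_goals (goals : List (List (String × String))) : Prop :=
  ∀ g ∈ goals, (PySem.Dict.mk g).contains "name" = true
instance (goals : List (List (String × String))) : Decidable (Pre_cluster_goals goals) := by unfold Pre_cluster_goals; infer_instance

def pvWitness_cluster_goals : (List (List (String × String))) :=
  [[("name", "ml-tuner")], [("name", "swarm-sync")], [("name", "planner")]]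

def Spec_cluster_goals (goals : List (List (String × String))) (out : List (String × List (List (String × String)))) : Prop := out = cluster_goals_alt goals
instance (goals : List (List (String × String))) (out : List (String × List (List (String × String)))) : Decidable (Spec_cluster_goals goals out) := by unfold Spec_cluster_goals; infer_instance

-- ===== CLAIM (what is proved, stated in full; the proofs are below) =====
def Claim_equal_cluster_goals : Prop := ∀ (goals : List (List (String × String))), Dom_cluster_goals goals → Pre_cluster_goals goals → Spec_cluster_goals goals (cluster_goals goals)

-- ===== LEMMAS AND PROOFS =====

-- A's loop body (setdefault-style insert, then append) is a single Dict.modify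
theorem pv_step_eq (d : PySem.Dict String (List (List (String × String)))) (c : String)
    (g : List (String × String)) :
    (if d.contains c then d else d.insert c []).modify c [] (fun v => v ++ [g])
      = d.modify c [] (fun v => v ++ [g]) := by
  by_cases h : d.contains c = true
  · simp [h]
  · have h' : d.contains c = false := by simp_all
    simp [h', PySem.Dict.modify, PySem.Dict.getD_insert_self, PySem.Dict.insert_insert_self,
      PySem.Dict.getD_of_not_contains d ([] : List (List (String × String))) h']

theorem cluster_goals_eq_fold (goals : List (List (String × String))) :
    cluster_goals goals
      = (goals.foldl (fun d g => d.modify (pvClusterOf g) [] (fun v => v ++ [g]))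
          PySem.Dict.empty).items := by
  unfold cluster_goals
  congr 1
  apply PySem.List.foldl_congr_mem
  intro d g _
  exact pv_step_eq d (pvClusterOf g) g

-- ===== VERDICT (by name: the statement is the Claim_ definition above) =====
theorem cluster_goals_spec : Claim_equal_cluster_goals := by
  intro goals _ _
  unfold Spec_cluster_goals cluster_goals_alt
  rw [cluster_goals_eq_fold]
  set D := goals.foldl (fun d g => d.modify (pvClusterOf g) [] (fun v => v ++ [g]))
      PySem.Dict.empty with hD
  have hnd : D.keys.Nodup :=
    PySem.Dict.nodup_keys_foldl_modify_key goals pvClusterOf []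
      (fun _ g => fun v => v ++ [g]) PySem.Dict.empty (by simp [PySem.Dict.keys_empty])
  have hkeys : D.keys = PySem.Set.ofList (goals.map pvClusterOf) := by
    rw [hD, PySem.Dict.keys_foldl_modify_key goals pvClusterOf []
      (fun _ g => fun v => v ++ [g]) PySem.Dict.empty]
    simp [pysem, PySem.Dict.keys_empty, PySem.Set.update, PySem.Set.ofList_eq_foldl]
  have hget : ∀ c, D.getD c [] = goals.filter (fun g => pvClusterOf g == c) := by
    intro c
    have hmap : D = (goals.map (fun g => (pvClusterOf g, g))).foldl
        (fun d p => d.modify p.1 [] (fun v => v ++ [p.2])) PySem.Dict.empty := by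
      rw [hD, List.foldl_map]
    rw [hmap, PySem.Dict.getD_foldl_modify_append]
    simp [List.filter_map, Function.comp_def]
  have hded : PySem.List.dedup (goals.map pvClusterOf)
      = PySem.Set.ofList (goals.map pvClusterOf) := by simp [pysem]
  rw [PySem.Dict.items_eq_map_keys D hnd [], hkeys, hded]
  simp only [hget]
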